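-- pv_equiv track=rewrite | github.com/wstanford-wastelinq/wastelinq-portal-automation | WASTELINQ-Portal-Automation/portals/mapping_scripts/tradebe_mapping.py | _determine_physical_state
-- ===== SOURCE A (Python) =====
-- from typing import Dict, Any, List, Optional, Tuple
--
-- def _determine_physical_state(data: Dict[str, Any]) -> str:
--
--     def is_true(value: Any) -> bool:
--         """Helper function to check if a value represents True"""
--         if isinstance(value, bool):
--             return value
--         if isinstance(value, str):
--             return value.upper() in ('TRUE', 'YES', '1')
--         return False
--
--     states = {
--         "SOLID": is_true(data.get("PCPhysicalStateSolid2")),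
--         "LIQUID": is_true(data.get("PCPPhysicalStateLiquid2")),
--         "SLUDGE": is_true(data.get("PCPPhysicalStateSludge2")),
--         "GAS": is_true(data.get("PCPPhysicalStateGas2"))
--     }
--
--     true_states = [state for state, value in states.items() if value]
--
--     # If no states are True, return empty string
--     if not true_states:
--         return ""
--
--     # If multiple states are True, prioritize in this order
--     priority_order = ["LIQUID", "SLUDGE", "SOLID", "GAS"]
--     for state in priority_order:
--         if state in true_states:
--             return state
--
--     # If none of the priority states match, return the first true state
--     return true_states[0]
-- ===== SOURCE B (Python) =====
-- def _determine_physical_state(data):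
--
--     def is_true(value):
--         """Helper function to check if a value represents True"""
--         if isinstance(value, bool):
--             return value
--         if isinstance(value, str):
--             return value.upper() in ('TRUE', 'YES', '1')
--         return False
--
--     priority = [
--         ("LIQUID", "PCPPhysicalStateLiquid2"),
--         ("SLUDGE", "PCPPhysicalStateSludge2"),
--         ("SOLID", "PCPhysicalStateSolid2"),
--         ("GAS", "PCPPhysicalStateGas2"),
--     ]
--     for state, key in priority:
--         if is_true(data.get(key)):
--             return state
--     return ""
-- ===== Notes on version B (the rewrite author's own statement) =====
-- stated objective: simpler
-- what changed: Replaces the states dict, the true_states list comprehension and the two-stage membership/fallback logic with a single pass over an ordered (state, key) priority table, returning the first state whose flag is true.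
import Mathlib
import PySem

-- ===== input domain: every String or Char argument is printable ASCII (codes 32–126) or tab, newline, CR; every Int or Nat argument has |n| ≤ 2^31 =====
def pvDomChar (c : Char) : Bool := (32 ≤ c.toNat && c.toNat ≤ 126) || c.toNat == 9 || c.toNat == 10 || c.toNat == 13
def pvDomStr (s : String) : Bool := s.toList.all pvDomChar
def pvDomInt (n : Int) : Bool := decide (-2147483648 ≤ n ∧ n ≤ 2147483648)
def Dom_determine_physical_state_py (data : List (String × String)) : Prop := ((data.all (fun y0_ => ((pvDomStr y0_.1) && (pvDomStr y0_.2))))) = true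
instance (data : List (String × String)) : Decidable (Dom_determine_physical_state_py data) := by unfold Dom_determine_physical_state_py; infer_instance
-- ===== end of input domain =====

-- B replaces A's states dict + true_states list + membership/fallback logic with one pass over an ordered (state, key) priority table (objective: simpler).


-- ===== PORT A =====
-- A's nested is_true: values here are always str (possibly absent), so the bool branch never fires
def pvIsTrueA (value : Option String) : Bool :=
  match value with
  | none => false
  | some s =>
      let u := PySem.Str.upper s
      u == "TRUE" || u == "YES" || u == "1"

def determine_physical_state_py (data : List (String × String)) : String :=
  let d := PySem.Dict.mk data
  let states : PySem.Dict String Bool :=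
    ((((PySem.Dict.empty).insert "SOLID" (pvIsTrueA (d.get? "PCPhysicalStateSolid2"))).insert
        "LIQUID" (pvIsTrueA (d.get? "PCPPhysicalStateLiquid2"))).insert
        "SLUDGE" (pvIsTrueA (d.get? "PCPPhysicalStateSludge2"))).insert
        "GAS" (pvIsTrueA (d.get? "PCPPhysicalStateGas2"))
  let true_states : List String := (states.items.filter (fun p => p.2)).map (fun p => p.1)
  match true_states with
  | [] => ""
  | t :: _ =>
      let priority_order : List String := ["LIQUID", "SLUDGE", "SOLID", "GAS"]
      match priority_order.find? (fun st => true_states.contains st) with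
      | some st => st
      | none => t

-- ===== PORT B =====
-- B's is_true (same nested helper, kept separate for B's port)
def pvIsTrueB (value : Option String) : Bool :=
  match value with
  | none => false
  | some s =>
      let u := PySem.Str.upper s
      u == "TRUE" || u == "YES" || u == "1"

def determine_physical_state_py_alt (data : List (String × String)) : String :=
  let priority : List (String × String) :=
    [("LIQUID", "PCPPhysicalStateLiquid2"),
     ("SLUDGE", "PCPPhysicalStateSludge2"),
     ("SOLID", "PCPhysicalStateSolid2"),
     ("GAS", "PCPPhysicalStateGas2")]
  match priority.find? (fun p => pvIsTrueB ((PySem.Dict.mk data).get? p.2)) with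
  | some p => p.1
  | none => ""

-- ===== PRECONDITION & SPEC =====
def Spec_determine_physical_state_py (data : List (String × String)) (out : String) : Prop := out = determine_physical_state_py_alt data
instance (data : List (String × String)) (out : String) : Decidable (Spec_determine_physical_state_py data out) := by unfold Spec_determine_physical_state_py; infer_instance

-- ===== CLAIM (what is proved, stated in full; the proofs are below) =====
def Claim_equal_determine_physical_state_py : Prop := ∀ (data : List (String × String)), Dom_determine_physical_state_py data → Spec_determine_physical_state_py data (determine_physical_state_py data)

-- ===== LEMMAS AND PROOFS =====
theorem pvIsTrue_eq (v : Option String) : pvIsTrueA v = pvIsTrueB v := rfl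

-- ===== VERDICT (by name: the statement is the Claim_ definition above) =====
theorem determine_physical_state_py_spec : Claim_equal_determine_physical_state_py := by
  intro data _
  unfold Spec_determine_physical_state_py determine_physical_state_py determine_physical_state_py_alt
  simp only [pvIsTrue_eq]
  set d := PySem.Dict.mk data
  cases hS : pvIsTrueB (d.get? "PCPhysicalStateSolid2") <;>
  cases hL : pvIsTrueB (d.get? "PCPPhysicalStateLiquid2") <;>
  cases hSl : pvIsTrueB (d.get? "PCPPhysicalStateSludge2") <;>
  cases hG : pvIsTrueB (d.get? "PCPPhysicalStateGas2") <;>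
    simp [PySem.Dict.insert, PySem.Dict.empty, List.find?, List.filter, hS, hL, hSl, hG]
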